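-- pv_equiv track=rewrite | github.com/christianslothouber/advent-of-code-2015 | d03/solution.py | find_visited_houses_with_robot_santa
-- ===== SOURCE A (Python) =====
-- def find_visited_houses_with_robot_santa(instructions):
--     x_santa = 0
--     y_santa = 0
--
--     x_robot = 0
--     y_robot = 0
--
--     houses = {(x_santa, y_santa), (x_robot, y_robot)}
--
--     for index, instruction in enumerate(instructions):
--         if index % 2 == 0:
--             if instruction == '>':
--                 x_santa += 1
--             if instruction == '<':
--                 x_santa -= 1
--             if instruction == '^':
--                 y_santa += 1
--             if instruction == 'v':
--                 y_santa -= 1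
--
--             house = (x_santa, y_santa)
--
--             houses.add(house)
--         else:
--             if instruction == '>':
--                 x_robot += 1
--             if instruction == '<':
--                 x_robot -= 1
--             if instruction == '^':
--                 y_robot += 1
--             if instruction == 'v':
--                 y_robot -= 1
--
--             house = (x_robot, y_robot)
--
--             houses.add(house)
--
--     return houses
-- ===== SOURCE B (Python) =====
-- _DELTAS = {'>': (1, 0), '<': (-1, 0), '^': (0, 1), 'v': (0, -1)}
--
--
-- def _alternate_walk(moves):
--     """Positions visited by one walker who starts at the origin and performs every
--     other move of the sequence, beginning with the first (origin itself excluded)."""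
--     x = y = 0
--     path = []
--     it = iter(moves)
--     for ch in it:
--         dx, dy = _DELTAS.get(ch, (0, 0))
--         x += dx
--         y += dy
--         path.append((x, y))
--         next(it, None)  # discard the other actor's move
--     return path
--
--
-- def find_visited_houses_with_robot_santa(instructions):
--     santa = _alternate_walk(instructions)
--     robot = _alternate_walk(instructions[1:])
--     merged = [(0, 0)]
--     for s, r in zip(santa, robot):
--         merged.append(s)
--         merged.append(r)
--     if len(santa) > len(robot):
--         merged.append(santa[len(robot)])
--     return set(merged)
-- ===== Notes on version B (the rewrite author's own statement) =====
-- stated objective: alternative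
-- what changed: Instead of one enumerate loop branching on index parity while mutating a set, B stages the work: two independent walks over alternating characters (Santa's and the robot's subsequences) produce explicit position lists, which are then zip-interleaved into one stream and deduplicated by a single final set().
import Mathlib
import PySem

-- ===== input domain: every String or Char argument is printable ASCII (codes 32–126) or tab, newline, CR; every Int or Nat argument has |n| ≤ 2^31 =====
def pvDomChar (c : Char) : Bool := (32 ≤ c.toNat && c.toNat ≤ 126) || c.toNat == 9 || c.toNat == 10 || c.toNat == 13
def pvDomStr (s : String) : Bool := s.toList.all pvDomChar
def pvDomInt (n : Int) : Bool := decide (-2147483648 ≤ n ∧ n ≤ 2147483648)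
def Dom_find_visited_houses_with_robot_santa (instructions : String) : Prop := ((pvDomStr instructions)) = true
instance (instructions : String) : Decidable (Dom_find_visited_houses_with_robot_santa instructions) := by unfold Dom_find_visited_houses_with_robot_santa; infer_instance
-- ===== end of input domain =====

-- B replaces A's single parity-branching loop by two staged alternating walks, a zip-interleave and one final set() — objective: alternative (same cost, different decomposition).


-- ===== PORT A =====
-- the enumerate loop of A, branching on index parity, four independent ifs per side
def pvGoA : List (Int × Char) → Int → Int → Int → Int → PySem.Set (Int × Int) → PySem.Set (Int × Int)
  | [], _, _, _, _, houses => houses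
  | (index, instruction) :: rest, xs, ys, xr, yr, houses =>
    if PySem.Int.mod index 2 == 0 then
      let xs := if instruction == '>' then xs + 1 else xs
      let xs := if instruction == '<' then xs - 1 else xs
      let ys := if instruction == '^' then ys + 1 else ys
      let ys := if instruction == 'v' then ys - 1 else ys
      pvGoA rest xs ys xr yr (PySem.Set.add houses (xs, ys))
    else
      let xr := if instruction == '>' then xr + 1 else xr
      let xr := if instruction == '<' then xr - 1 else xr
      let yr := if instruction == '^' then yr + 1 else yr
      let yr := if instruction == 'v' then yr - 1 else yr
      pvGoA rest xs ys xr yr (PySem.Set.add houses (xr, yr))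

def find_visited_houses_with_robot_santa (instructions : String) : List (Int × Int) :=
  pvGoA (PySem.List.enumerate instructions.toList 0) 0 0 0 0
    (PySem.Set.ofList [((0 : Int), (0 : Int)), (0, 0)])

-- ===== PORT B =====
def pvDeltas : PySem.Dict Char (Int × Int) :=
  PySem.Dict.ofList [('>', (1, 0)), ('<', (-1, 0)), ('^', (0, 1)), ('v', (0, -1))]

-- _alternate_walk: act on the next move, then 'next(it, None)' discards one element (= rest.drop 1, exact)
def pvWalk : List Char → Int → Int → List (Int × Int)
  | [], _, _ => []
  | c :: rest, x, y =>
    let d := PySem.Dict.getD pvDeltas c (0, 0)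
    (x + d.1, y + d.2) :: pvWalk (rest.drop 1) (x + d.1) (y + d.2)
  termination_by moves => moves.length
  decreasing_by
    simp

-- the 'for s, r in zip(santa, robot): merged.append(s); merged.append(r)' loop
def pvMergeZip : List ((Int × Int) × (Int × Int)) → List (Int × Int) → List (Int × Int)
  | [], merged => merged
  | (s, r) :: rest, merged => pvMergeZip rest (merged ++ [s, r])

def find_visited_houses_with_robot_santa_alt (instructions : String) : List (Int × Int) :=
  let santa := pvWalk instructions.toList 0 0
  let robot := pvWalk (PySem.List.slice instructions.toList (some 1) none) 0 0
  let merged := pvMergeZip (santa.zip robot) [(0, 0)]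
  -- santa[len(robot)]: in range by the guard, so .getD's default is never used
  let merged := if robot.length < santa.length
    then merged ++ [(PySem.List.pyGet? santa (robot.length : Int)).getD (0, 0)]
    else merged
  PySem.Set.ofList merged

-- ===== PRECONDITION & SPEC =====
def Spec_find_visited_houses_with_robot_santa (instructions : String) (out : List (Int × Int)) : Prop := out = find_visited_houses_with_robot_santa_alt instructions
instance (instructions : String) (out : List (Int × Int)) : Decidable (Spec_find_visited_houses_with_robot_santa instructions out) := by unfold Spec_find_visited_houses_with_robot_santa; infer_instance

-- ===== CLAIM (what is proved, stated in full; the proofs are below) =====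
def Claim_equal_find_visited_houses_with_robot_santa : Prop := ∀ (instructions : String), Dom_find_visited_houses_with_robot_santa instructions → Spec_find_visited_houses_with_robot_santa instructions (find_visited_houses_with_robot_santa instructions)

-- ===== LEMMAS AND PROOFS =====

-- the interleaved stream of houses actually visited: the current actor moves, records a house, actors swap
def pvStream : List Char → Int × Int → Int × Int → List (Int × Int)
  | [], _, _ => []
  | c :: rest, cur, other =>
    let d := PySem.Dict.getD pvDeltas c (0, 0)
    let cur' := (cur.1 + d.1, cur.2 + d.2)
    cur' :: pvStream rest other cur'

-- A's four independent ifs compute exactly the delta-table step, coordinatewise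
lemma pv_step_eq (c : Char) (x y : Int) :
    ((if c == '<' then (if c == '>' then x + 1 else x) - 1 else (if c == '>' then x + 1 else x)),
     (if c == 'v' then (if c == '^' then y + 1 else y) - 1 else (if c == '^' then y + 1 else y)))
    = (x + (PySem.Dict.getD pvDeltas c (0, 0)).1, y + (PySem.Dict.getD pvDeltas c (0, 0)).2) := by
  by_cases h1 : c = '>'
  · subst h1
    rw [show PySem.Dict.getD pvDeltas '>' ((0:Int),(0:Int)) = (1,0) from by decide]
    simp
  by_cases h2 : c = '<'
  · subst h2
    rw [show PySem.Dict.getD pvDeltas '<' ((0:Int),(0:Int)) = (-1,0) from by decide]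
    simp; ring
  by_cases h3 : c = '^'
  · subst h3
    rw [show PySem.Dict.getD pvDeltas '^' ((0:Int),(0:Int)) = (0,1) from by decide]
    simp
  by_cases h4 : c = 'v'
  · subst h4
    rw [show PySem.Dict.getD pvDeltas 'v' ((0:Int),(0:Int)) = (0,-1) from by decide]
    simp; ring
  · have hd : pvDeltas
        = PySem.Dict.mk [('>', (1, 0)), ('<', (-1, 0)), ('^', (0, 1)), ('v', (0, -1))] := by decide
    rw [hd, PySem.Dict.getD_eq_get?_getD]
    simp [PySem.Dict.get?, beq_iff_eq, h1, h2, h3, h4,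
      Ne.symm h1, Ne.symm h2, Ne.symm h3, Ne.symm h4]

-- loop invariant for A: the enumerate loop folds Set.add over the interleaved stream,
-- with (santa, robot) ordered by the parity of the starting index
lemma pvGoA_eq_fold (cs : List Char) (i xs ys xr yr : Int)
    (h : PySem.Set (Int × Int)) :
    pvGoA (PySem.List.enumerate cs i) xs ys xr yr h =
      if PySem.Int.mod i 2 = 0 then (pvStream cs (xs, ys) (xr, yr)).foldl PySem.Set.add h
      else (pvStream cs (xr, yr) (xs, ys)).foldl PySem.Set.add h := by
  induction cs generalizing i xs ys xr yr h with
  | nil => simp [PySem.List.enumerate_nil, pvGoA, pvStream]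
  | cons c rest ih =>
    rw [PySem.List.enumerate_cons]
    have hmod : PySem.Int.mod i 2 = i % 2 :=
      PySem.Int.mod_eq_emod_of_pos (by norm_num)
    have hmod1 : PySem.Int.mod (i + 1) 2 = (i + 1) % 2 :=
      PySem.Int.mod_eq_emod_of_pos (by norm_num)
    rcases Int.emod_two_eq i with he | ho
    · -- even index: santa moves
      simp only [pvGoA, pvStream, hmod, he]
      norm_num
      rw [ih (i + 1)]
      have : (i + 1) % 2 = 1 := by omega
      rw [hmod1, this]
      simp only [one_ne_zero, if_false]
      have hs := pv_step_eq c xs ys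
      rw [Prod.mk.injEq] at hs; simp only [beq_iff_eq] at hs
      rw [hs.1, hs.2]
    · -- odd index: robot moves
      simp only [pvGoA, pvStream, hmod, ho]
      norm_num
      rw [ih (i + 1)]
      have : (i + 1) % 2 = 0 := by omega
      rw [hmod1, this]
      simp only [if_true]
      have hs := pv_step_eq c xr yr
      rw [Prod.mk.injEq] at hs; simp only [beq_iff_eq] at hs
      rw [hs.1, hs.2]

-- the zip loop only appends: its accumulator factors out
lemma pvMergeZip_append (pairs : List ((Int × Int) × (Int × Int))) (acc : List (Int × Int)) :
    pvMergeZip pairs acc = acc ++ pvMergeZip pairs [] := by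
  induction pairs generalizing acc with
  | nil => simp [pvMergeZip]
  | cons p rest ih =>
    obtain ⟨s, r⟩ := p
    rw [pvMergeZip, pvMergeZip, ih (acc ++ [s, r]), ih ([] ++ [s, r])]
    simp

-- pvWalk on []
lemma pvWalk_nil (x y : Int) : pvWalk [] x y = [] := by
  rw [pvWalk.eq_def]

-- unfolding pvWalk on a cons
lemma pvWalk_cons (c : Char) (rest : List Char) (x y : Int) :
    pvWalk (c :: rest) x y =
      (x + (PySem.Dict.getD pvDeltas c (0, 0)).1, y + (PySem.Dict.getD pvDeltas c (0, 0)).2) ::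
        pvWalk (rest.drop 1) (x + (PySem.Dict.getD pvDeltas c (0, 0)).1)
          (y + (PySem.Dict.getD pvDeltas c (0, 0)).2) := by
  conv_lhs => rw [pvWalk.eq_def]

-- core equivalence: zip-interleaving the two alternating walks (plus santa's possible
-- extra last house) rebuilds exactly the interleaved visiting stream
lemma pv_core : ∀ (cs : List Char) (x y u v : Int),
    (pvMergeZip ((pvWalk cs x y).zip (pvWalk (cs.drop 1) u v)) [] ++
      (if (pvWalk (cs.drop 1) u v).length < (pvWalk cs x y).length
        then [(PySem.List.pyGet? (pvWalk cs x y) (((pvWalk (cs.drop 1) u v).length : Nat) : Int)).getD (0, 0)]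
        else []))
    = pvStream cs (x, y) (u, v)
  | [], x, y, u, v => by simp [pvWalk_nil, pvMergeZip, pvStream]
  | [c], x, y, u, v => by
    rw [pvWalk_cons]
    simp only [List.drop_nil, List.drop_one, List.tail_cons]
    rw [pvWalk_nil, pvWalk_nil]
    simp [pvMergeZip, pvStream]
  | c :: d :: t, x, y, u, v => by
    rw [show (c :: d :: t).drop 1 = d :: t from rfl]
    rw [pvWalk_cons c (d :: t), pvWalk_cons d t]
    simp only [List.drop_one, List.tail_cons]
    have hrec := pv_core t (x + (PySem.Dict.getD pvDeltas c (0, 0)).1)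
      (y + (PySem.Dict.getD pvDeltas c (0, 0)).2)
      (u + (PySem.Dict.getD pvDeltas d (0, 0)).1)
      (v + (PySem.Dict.getD pvDeltas d (0, 0)).2)
    simp only [List.drop_one] at hrec
    rw [List.zip_cons_cons, pvMergeZip, pvMergeZip_append]
    simp only [List.length_cons, add_lt_add_iff_right]
    have hget : ∀ (a : Int × Int) (A : List (Int × Int)) (n : Nat),
        (PySem.List.pyGet? (a :: A) ((((n + 1) : Nat) : Int))).getD ((0 : Int), (0 : Int))
          = (PySem.List.pyGet? A ((n : Nat) : Int)).getD (0, 0) := by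
      intro a A n
      rw [PySem.List.pyGet?_natCast, PySem.List.pyGet?_natCast]
      simp
    simp only [pvStream]
    split_ifs with hlen
    · rw [if_pos hlen] at hrec
      rw [hget]
      simp only [List.nil_append, List.cons_append]
      rw [hrec]
    · rw [if_neg hlen] at hrec
      simp only [List.append_nil] at hrec
      simp only [List.nil_append, List.cons_append, List.append_nil]
      rw [hrec]

-- ===== VERDICT (by name: the statement is the Claim_ definition above) =====
theorem find_visited_houses_with_robot_santa_spec : Claim_equal_find_visited_houses_with_robot_santa := by
  intro instructions _
  unfold Spec_find_visited_houses_with_robot_santa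
  unfold find_visited_houses_with_robot_santa
  rw [pvGoA_eq_fold]
  rw [show PySem.Int.mod 0 2 = 0 from by decide, if_pos rfl]
  rw [show PySem.Set.ofList [((0:Int),(0:Int)), (0,0)] = [((0:Int),(0:Int))] from by decide]
  simp only [find_visited_houses_with_robot_santa_alt]
  rw [PySem.List.slice_from _ (by norm_num)]
  rw [show ((1:Int).toNat) = 1 from rfl]
  have hcore := pv_core instructions.toList 0 0 0 0
  split_ifs with hlen
  · rw [if_pos hlen] at hcore
    rw [pvMergeZip_append, List.append_assoc, hcore,
      PySem.Set.ofList_eq_foldl, List.singleton_append, List.foldl_cons,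
      show PySem.Set.add ([] : PySem.Set (Int × Int)) (0,0) = [((0:Int),(0:Int))] from rfl]
  · rw [if_neg hlen] at hcore
    simp only [List.append_nil] at hcore
    rw [pvMergeZip_append, hcore,
      PySem.Set.ofList_eq_foldl, List.singleton_append, List.foldl_cons,
      show PySem.Set.add ([] : PySem.Set (Int × Int)) (0,0) = [((0:Int),(0:Int))] from rfl]
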